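-- pv_equiv track=rewrite | github.com/MinMolang/codePractice | Programmers/PRETEST4.py | solution
-- ===== SOURCE A (Python) =====
-- def solution(a,b):
--     answer  = 0
--     it  = a*b
--     bit = bin(it)
--     for t in bit:
--         if t=='1':
--             answer+=1
--     return answer
-- ===== SOURCE B (Python) =====
-- def solution(a, b):
--     it = abs(a * b)
--     answer = 0
--     while it:
--         answer += it & 1
--         it >>= 1
--     return answer
-- ===== Notes on version B (the rewrite author's own statement) =====
-- stated objective: idiomatic
-- what changed: B replaces building the binary string with bin() and scanning its characters by a direct bit-shift/mask loop on abs(a*b).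
import Mathlib
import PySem

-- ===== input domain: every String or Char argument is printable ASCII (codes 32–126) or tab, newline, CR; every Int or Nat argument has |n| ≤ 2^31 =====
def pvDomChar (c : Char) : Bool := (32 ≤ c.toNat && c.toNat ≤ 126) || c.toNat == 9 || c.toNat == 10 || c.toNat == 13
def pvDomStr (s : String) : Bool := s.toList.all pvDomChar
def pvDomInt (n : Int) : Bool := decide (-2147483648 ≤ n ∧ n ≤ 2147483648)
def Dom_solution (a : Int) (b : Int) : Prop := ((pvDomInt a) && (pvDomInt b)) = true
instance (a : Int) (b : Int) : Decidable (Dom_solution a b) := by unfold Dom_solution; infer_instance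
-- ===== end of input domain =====

-- B counts the set bits of abs(a*b) with a shift/mask loop instead of building
-- the bin() string and scanning its characters (objective: idiomatic).

-- ===== PORT A =====
-- digits of n in binary, most significant first (the part of Python's bin(n)
-- after the '0b' prefix, for n > 0)
def binCore : Nat → List Char
  | 0 => []
  | n + 1 =>
    binCore ((n + 1) / 2) ++ [if (n + 1) % 2 = 1 then '1' else '0']
  decreasing_by exact Nat.div_lt_self (Nat.succ_pos n) (by norm_num)

-- bin(it) as a character list: optional '-', then '0b', then the digits
def binStr (it : Int) : List Char :=
  (if it < 0 then ['-'] else []) ++ ['0', 'b'] ++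
    (if it.natAbs = 0 then ['0'] else binCore it.natAbs)

def solution (a : Int) (b : Int) : Int :=
  (binStr (a * b)).foldl (fun answer t => if t = '1' then answer + 1 else answer) 0

-- ===== PORT B =====
-- while it: answer += it & 1; it >>= 1   (on it = |a*b|)
def popLoop : Nat → Int
  | 0 => 0
  | n + 1 => ((n + 1) % 2 : Nat) + popLoop ((n + 1) >>> 1)
  decreasing_by simpa [Nat.shiftRight_succ] using Nat.div_lt_self (Nat.succ_pos n) (by norm_num)

def solution_alt (a : Int) (b : Int) : Int :=
  popLoop (a * b).natAbs

-- ===== PRECONDITION & SPEC =====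
def Spec_solution (a : Int) (b : Int) (out : Int) : Prop := out = solution_alt a b
instance (a : Int) (b : Int) (out : Int) : Decidable (Spec_solution a b out) := by unfold Spec_solution; infer_instance

-- ===== CLAIM (what is proved, stated in full; the proofs are below) =====
def Claim_equal_solution : Prop := ∀ (a : Int) (b : Int), Dom_solution a b → Spec_solution a b (solution a b)

-- ===== LEMMAS AND PROOFS =====

theorem foldl_count_ones (l : List Char) (acc : Int) :
    l.foldl (fun answer t => if t = '1' then answer + 1 else answer) acc
      = acc + (l.countP (· = '1') : Int) := by
  induction l generalizing acc with
  | nil => simp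
  | cons c l ih =>
    simp only [List.foldl_cons, List.countP_cons, ih]
    by_cases h : c = '1' <;> simp [h] <;> try ring

theorem countP_binCore (n : Nat) :
    ((binCore n).countP (· = '1') : Int) = popLoop n := by
  induction n using Nat.strong_induction_on with
  | _ n ih =>
    match n with
    | 0 => simp [binCore, popLoop]
    | m + 1 =>
      have hs : (m + 1) >>> 1 = (m + 1) / 2 := Nat.shiftRight_one _
      rw [binCore, popLoop, List.countP_append, Nat.cast_add,
        ih ((m + 1) / 2) (Nat.div_lt_self (Nat.succ_pos m) (by norm_num)), hs]
      rcases Nat.mod_two_eq_zero_or_one (m + 1) with h | h <;>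
        simp [h, List.countP, List.countP.go] <;> try ring

-- ===== VERDICT (by name: the statement is the Claim_ definition above) =====
theorem solution_spec : Claim_equal_solution := by
  intro a b _
  unfold Spec_solution solution solution_alt binStr
  rw [foldl_count_ones]
  by_cases h0 : (a * b).natAbs = 0
  · have hlt : ¬ a * b < 0 := by
      intro h; exact absurd (Int.natAbs_eq_zero.mp h0) (by omega)
    simp [h0, hlt, popLoop, List.countP]
  · by_cases hlt : a * b < 0 <;>
      · simp only [h0, hlt, if_true, if_false, List.countP_append]
        push_cast
        rw [countP_binCore]
        simp [List.countP]
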